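-- pv_equiv track=rewrite | github.com/yawks/pyrssw | pyrssw_handlers/eurosport_handler.py | _get_style
-- ===== SOURCE A (Python) =====
-- def _get_style(content_dict: dict):
--     style: str = "%s"
--     if "style" in content_dict:
--         for st in content_dict["style"]:
--             if st == "bold":
--                 style = style % "<b>%s</b>"
--             elif st == "italic":
--                 style = style % "<i>%s/</i>"
--
--     return style
-- ===== SOURCE B (Python) =====
-- def _get_style(content_dict: dict):
--     prefix = ""
--     suffix = ""
--     for st in content_dict.get("style", ()):
--         if st == "bold":
--             prefix += "<b>"
--             suffix = "</b>" + suffix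
--         elif st == "italic":
--             prefix += "<i>"
--             suffix = "/</i>" + suffix
--     return prefix + "%s" + suffix
-- ===== Notes on version B (the rewrite author's own statement) =====
-- stated objective: simpler
-- what changed: Replaces repeated '%' re-substitution into a nested format string by accumulating a prefix and a suffix string and concatenating prefix + '%s' + suffix once at the end.
import Mathlib
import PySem

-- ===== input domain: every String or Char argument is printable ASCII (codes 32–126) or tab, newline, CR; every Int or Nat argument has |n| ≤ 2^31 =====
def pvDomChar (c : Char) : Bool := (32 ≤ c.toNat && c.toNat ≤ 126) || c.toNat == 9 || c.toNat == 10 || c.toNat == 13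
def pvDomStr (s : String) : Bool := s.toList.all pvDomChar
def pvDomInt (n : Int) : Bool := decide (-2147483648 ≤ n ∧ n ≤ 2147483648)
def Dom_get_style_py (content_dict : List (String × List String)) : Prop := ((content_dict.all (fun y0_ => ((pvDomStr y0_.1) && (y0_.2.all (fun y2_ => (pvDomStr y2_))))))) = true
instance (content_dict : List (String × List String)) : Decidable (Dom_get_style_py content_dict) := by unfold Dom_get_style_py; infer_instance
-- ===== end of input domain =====

-- ===== PORT A =====
-- B builds the wrapper as prefix ++ "%s" ++ suffix instead of A's repeated %-substitution
-- into a nested format string; objective: simpler.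

-- Port of Python's `fmt % arg` for OUR format strings, which always contain exactly one
-- "%s" and no other '%': replace the first "%s" by `arg` (exact on that domain).
def pvSubst : List Char → List Char → List Char
  | [], _ => []
  | c :: rest, x =>
    if c = '%' ∧ rest.head? = some 's' then x ++ rest.tail
    else c :: pvSubst rest x

def pvStepA (style : List Char) (st : String) : List Char :=
  if st = "bold" then pvSubst style ("<b>%s</b>".toList)
  else if st = "italic" then pvSubst style ("<i>%s/</i>".toList)
  else style

def get_style_py (content_dict : List (String × List String)) : String :=
  match (PySem.Dict.mk content_dict).get? "style" with
  | some sts => String.mk (sts.foldl pvStepA ("%s".toList))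
  | none => "%s"

-- ===== PORT B =====
def pvStepB (pq : List Char × List Char) (st : String) : List Char × List Char :=
  if st = "bold" then (pq.1 ++ "<b>".toList, "</b>".toList ++ pq.2)
  else if st = "italic" then (pq.1 ++ "<i>".toList, "/</i>".toList ++ pq.2)
  else pq

def get_style_py_alt (content_dict : List (String × List String)) : String :=
  let sts := ((PySem.Dict.mk content_dict).get? "style").getD []
  let pq := sts.foldl pvStepB ([], [])
  String.mk (pq.1 ++ "%s".toList ++ pq.2)
-- ===== PRECONDITION & SPEC =====
def Spec_get_style_py (content_dict : List (String × List String)) (out : String) : Prop := out = get_style_py_alt content_dict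
instance (content_dict : List (String × List String)) (out : String) : Decidable (Spec_get_style_py content_dict out) := by unfold Spec_get_style_py; infer_instance

-- ===== CLAIM (what is proved, stated in full; the proofs are below) =====
def Claim_equal_get_style_py : Prop := ∀ (content_dict : List (String × List String)), Dom_get_style_py content_dict → Spec_get_style_py content_dict (get_style_py content_dict)

-- ===== LEMMAS AND PROOFS =====

-- ===== VERDICT (by name: the statement is the Claim_ definition above) =====
-- pvSubst on p ++ "%s" ++ q with '%' not in p replaces exactly the junction occurrence.
theorem pvSubst_split (p q x : List Char) (hp : '%' ∉ p) :
    pvSubst (p ++ '%' :: 's' :: q) x = p ++ x ++ q := by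
  induction p with
  | nil => simp [pvSubst]
  | cons c p ih =>
    have hc : c ≠ '%' := fun h => hp (h ▸ List.mem_cons_self)
    have hp' : '%' ∉ p := fun h => hp (List.mem_cons_of_mem _ h)
    simp [pvSubst, hc, ih hp']

theorem pv_loop (sts : List String) (p q : List Char) (hp : '%' ∉ p) :
    sts.foldl pvStepA (p ++ '%' :: 's' :: q) =
      (sts.foldl pvStepB (p, q)).1 ++ '%' :: 's' :: (sts.foldl pvStepB (p, q)).2 := by
  induction sts generalizing p q with
  | nil => simp
  | cons st sts ih =>
    by_cases hb : st = "bold"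
    · have h1 : pvStepA (p ++ '%' :: 's' :: q) st
          = (p ++ "<b>".toList) ++ '%' :: 's' :: ("</b>".toList ++ q) := by
        rw [pvStepA, if_pos hb, show ("<b>%s</b>".toList : List Char)
            = "<b>".toList ++ '%' :: 's' :: "</b>".toList from rfl,
          pvSubst_split p _ _ hp]
        simp
      have hp' : '%' ∉ p ++ "<b>".toList := by
        intro h; rcases List.mem_append.1 h with h | h
        · exact hp h
        · simp at h
      simp only [List.foldl_cons, h1, pvStepB, if_pos hb]
      exact ih _ _ hp'
    · by_cases hi : st = "italic"
      · have h1 : pvStepA (p ++ '%' :: 's' :: q) st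
            = (p ++ "<i>".toList) ++ '%' :: 's' :: ("/</i>".toList ++ q) := by
          rw [pvStepA, if_neg hb, if_pos hi, show ("<i>%s/</i>".toList : List Char)
              = "<i>".toList ++ '%' :: 's' :: "/</i>".toList from rfl,
            pvSubst_split p _ _ hp]
          simp
        have hp' : '%' ∉ p ++ "<i>".toList := by
          intro h; rcases List.mem_append.1 h with h | h
          · exact hp h
          · simp at h
        simp only [List.foldl_cons, h1, pvStepB, if_neg hb, if_pos hi]
        exact ih _ _ hp'
      · simp only [List.foldl_cons, pvStepA, pvStepB, if_neg hb, if_neg hi]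
        exact ih _ _ hp

-- ===== VERDICT (by name: the statement is the Claim_ definition above) =====
theorem get_style_py_spec : Claim_equal_get_style_py := by
  intro content_dict _
  unfold Spec_get_style_py get_style_py get_style_py_alt
  cases h : (PySem.Dict.mk content_dict).get? "style" with
  | none => rfl
  | some sts =>
    simp only [Option.getD_some]
    have := pv_loop sts [] [] (by simp)
    simp only [List.nil_append] at this
    rw [show ("%s".toList : List Char) = '%' :: 's' :: ([] : List Char) from rfl, this]
    simp
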